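-- pv_equiv track=rewrite | github.com/ejwessel/AdventOfCode2019 | Day_4/SecureContainer.py | check_duplicates_freq
-- ===== SOURCE A (Python) =====
-- def check_duplicates_freq(num_str):
--     num_freq = {}
--     for i in range(0, len(num_str)):
--         if num_str[i] not in num_freq:
--             num_freq[num_str[i]] = 1
--         else:
--             num_freq[num_str[i]] += 1
--
--     for num in num_freq.values():
--         # skip if freq is 1
--         if num == 1:
--             continue
--         # # skip if freq is even, meaning it's not of 2 pair
--         # if num % 2 == 0:
--         #     return True
--         if num == 2:
--             return True
--     return False
-- ===== SOURCE B (Python) =====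
-- def check_duplicates_freq(num_str):
--     s = sorted(num_str)
--     while s:
--         c = s[0]
--         run = 1
--         while run < len(s) and s[run] == c:
--             run += 1
--         if run == 2:
--             return True
--         s = s[run:]
--     return False
-- ===== Notes on version B (the rewrite author's own statement) =====
-- stated objective: alternative
-- what changed: Replaces the frequency-dictionary build plus a scan of its values by sorting the characters and run-length scanning the sorted sequence, returning True at the first run of length exactly 2.
import Mathlib
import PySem

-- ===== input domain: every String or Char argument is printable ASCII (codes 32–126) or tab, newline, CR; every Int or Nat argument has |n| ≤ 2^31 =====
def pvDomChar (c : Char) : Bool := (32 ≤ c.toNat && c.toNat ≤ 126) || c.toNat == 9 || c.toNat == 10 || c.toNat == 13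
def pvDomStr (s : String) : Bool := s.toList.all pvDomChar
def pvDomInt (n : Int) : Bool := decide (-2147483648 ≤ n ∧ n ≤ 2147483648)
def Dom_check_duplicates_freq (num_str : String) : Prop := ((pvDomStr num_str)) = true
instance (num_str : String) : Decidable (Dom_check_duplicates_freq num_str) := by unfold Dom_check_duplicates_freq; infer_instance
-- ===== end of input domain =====

-- B sorts the characters and run-length scans the sorted sequence instead of
-- building a frequency dictionary and scanning its values (alternative strategy).

-- ===== PORT A =====
-- the 'for num in num_freq.values(): if num == 1: continue; if num == 2: return True' loop
def pvScanValues : List Int → Bool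
  | [] => false
  | n :: rest => if n == 1 then pvScanValues rest
                 else if n == 2 then true
                 else pvScanValues rest

def check_duplicates_freq (num_str : String) : Bool :=
  let s := num_str.toList
  let num_freq := (PySem.List.pyRange 0 (PySem.Str.len num_str) 1).foldl
    (fun d i =>
      let c := PySem.List.pyGetD s i ' '
      if !(d.contains c) then d.insert c (1 : Int)
      else d.insert c (d.getD c 0 + 1))
    PySem.Dict.empty
  pvScanValues num_freq.values

-- ===== PORT B =====
-- the 'while s: … inner while counting the run … s = s[run:]' loop of Source B
def pvGroupScan : List Char → Bool
  | [] => false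
  | c :: rest =>
    let run := (rest.takeWhile (· == c)).length + 1
    if run == 2 then true
    else pvGroupScan (rest.dropWhile (· == c))
  termination_by l => l.length
  decreasing_by
    simpa using Nat.lt_succ_of_le (List.length_dropWhile_le _ _)

def check_duplicates_freq_alt (num_str : String) : Bool :=
  pvGroupScan (PySem.List.sorted num_str.toList (fun c => c) false)

-- ===== PRECONDITION & SPEC =====
def Spec_check_duplicates_freq (num_str : String) (out : Bool) : Prop := out = check_duplicates_freq_alt num_str
instance (num_str : String) (out : Bool) : Decidable (Spec_check_duplicates_freq num_str out) := by unfold Spec_check_duplicates_freq; infer_instance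

-- ===== CLAIM (what is proved, stated in full; the proofs are below) =====
def Claim_equal_check_duplicates_freq : Prop := ∀ (num_str : String), Dom_check_duplicates_freq num_str → Spec_check_duplicates_freq num_str (check_duplicates_freq num_str)

-- ===== LEMMAS AND PROOFS =====

-- A's value-scan loop is 'some value equals 2'
theorem pvScanValues_eq_any (l : List Int) : pvScanValues l = l.any (· == 2) := by
  induction l with
  | nil => rfl
  | cons n rest ih =>
    by_cases h1 : n = 1
    · subst h1; simp [pvScanValues, ih]
    · by_cases h2 : n = 2 <;> simp [pvScanValues, h1, h2, ih]

-- no copy of c survives dropWhile (· == c) in an ordered list all of whose elements dominate c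
theorem pv_not_mem_dropWhile (c : Char) (l : List Char)
    (hp : l.Pairwise (· ≤ ·)) (hge : ∀ y ∈ l, c ≤ y) :
    c ∉ l.dropWhile (· == c) := by
  induction l with
  | nil => simp
  | cons a l' ih =>
    by_cases ha : a = c
    · subst ha
      simp only [List.dropWhile_cons, beq_self_eq_true]
      exact ih hp.tail (fun y hy => hge y (List.mem_cons_of_mem _ hy))
    · rw [List.dropWhile_cons_of_neg (by simpa using ha)]
      intro hmem
      rcases List.mem_cons.mp hmem with h | h
      · exact ha h.symm
      · have h1 : a ≤ c := (List.pairwise_cons.mp hp).1 c h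
        have h2 : c ≤ a := hge a (List.mem_cons_self)
        exact ha (le_antisymm h1 h2)

-- run-length scan of an ordered list = 'some element has count 2'
theorem pvGroupScan_eq_any : ∀ (n : Nat) (t : List Char), t.length ≤ n → t.Pairwise (· ≤ ·) →
    pvGroupScan t = t.any (fun c => t.count c == 2) := by
  intro n
  induction n with
  | zero =>
    intro t hlen _
    have : t = [] := List.eq_nil_of_length_eq_zero (Nat.le_zero.mp hlen)
    subst this; simp [pvGroupScan]
  | succ n ih =>
    intro t hlen hp
    match t with
    | [] => simp [pvGroupScan]
    | c :: rest =>
      rw [pvGroupScan]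
      set tw := rest.takeWhile (· == c) with htw
      set dw := rest.dropWhile (· == c) with hdw
      have hrest : rest = tw ++ dw := (List.takeWhile_append_dropWhile).symm
      have hnotin : c ∉ dw := by
        apply pv_not_mem_dropWhile c rest hp.tail
        intro y hy
        exact (List.pairwise_cons.mp hp).1 y hy
      have hdwp : dw.Pairwise (· ≤ ·) := List.Pairwise.sublist (List.dropWhile_sublist _) hp.tail
      have htwc : ∀ x ∈ tw, x = c := by
        intro x hx
        simpa using List.mem_takeWhile_imp hx
      have hcnt : (c :: rest).count c = tw.length + 1 := by
        rw [List.count_cons_self, hrest, List.count_append]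
        have h1 : tw.count c = tw.length := by
          rw [List.count_eq_length]
          intro x hx; simpa using (htwc x hx).symm
        have h2 : dw.count c = 0 := List.count_eq_zero.mpr hnotin
        omega
      have hcnt' : ∀ x, x ≠ c → (c :: rest).count x = dw.count x := by
        intro x hx
        have h1 : tw.count x = 0 := by
          rw [List.count_eq_zero]
          intro hmem; exact hx (htwc x hmem)
        rw [hrest]
        simp [List.count_append, h1, Ne.symm hx]
      by_cases h2 : tw.length + 1 = 2
      · rw [if_pos (by simpa using h2)]
        symm
        rw [List.any_eq_true]
        exact ⟨c, List.mem_cons_self, by simp [hcnt, h2]⟩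
      · rw [if_neg (by simpa using h2)]
        have hlen' : dw.length ≤ n := by
          have h3 : dw.length ≤ rest.length := by
            rw [hdw]; exact List.length_dropWhile_le _ _
          simp only [List.length_cons] at hlen
          omega
        rw [ih dw hlen' hdwp]
        rw [Bool.eq_iff_iff, List.any_eq_true, List.any_eq_true]
        constructor
        · rintro ⟨x, hxdw, hxc⟩
          have hxne : x ≠ c := fun h => hnotin (h ▸ hxdw)
          refine ⟨x, ?_, ?_⟩
          · exact List.mem_cons_of_mem _ (hrest ▸ List.mem_append_right tw hxdw)
          · rw [hcnt' x hxne]; exact hxc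
        · rintro ⟨x, hxt, hxc⟩
          have hxne : x ≠ c := by
            intro h; subst h
            rw [hcnt] at hxc
            exact h2 (by simpa using hxc)
          have hcntx : dw.count x = 2 := by
            rw [← hcnt' x hxne]; simpa using hxc
          refine ⟨x, ?_, by simp [hcntx]⟩
          exact List.count_pos_iff.mp (by omega)

-- ===== VERDICT (by name: the statement is the Claim_ definition above) =====
theorem check_duplicates_freq_spec : Claim_equal_check_duplicates_freq := by
  intro num_str _
  unfold Spec_check_duplicates_freq
  set sl := num_str.toList with hsl
  -- A side: the dict loop is Counter(sl)
  have hA : check_duplicates_freq num_str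
      = (PySem.Set.ofList sl).any (fun k => ((sl.count k : Int) == 2)) := by
    have hA1 : check_duplicates_freq num_str
        = pvScanValues (((PySem.List.pyRange 0 (PySem.Str.len num_str) 1).foldl
            (fun d i =>
              let c := PySem.List.pyGetD num_str.toList i ' '
              if !(d.contains c) then d.insert c (1 : Int)
              else d.insert c (d.getD c 0 + 1))
            PySem.Dict.empty).values) := rfl
    rw [hA1]
    rw [show PySem.Str.len num_str = (sl.length : Int) by simp [hsl]]
    rw [PySem.List.foldl_pyRange_zero_pyGetD' sl ' '
      (fun d c => if !(d.contains c) then d.insert c (1 : Int)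
                  else d.insert c (d.getD c 0 + 1)) PySem.Dict.empty]
    have hfun : (fun (d : PySem.Dict Char Int) (c : Char) =>
        if !(d.contains c) then d.insert c (1 : Int)
        else d.insert c (d.getD c 0 + 1))
        = fun d c => d.insert c (d.getD c 0 + 1) := by
      funext d c
      by_cases hc : d.contains c = true
      · simp [hc]
      · have h0 : d.getD c 0 = 0 :=
          PySem.Dict.getD_of_not_contains d 0 (by simpa using hc)
        simp [hc, h0]
    rw [hfun, PySem.Dict.foldl_insert_getD_add_one_eq_counter]
    rw [pvScanValues_eq_any]
    simp only [PySem.Dict.values, PySem.Dict.items_counter, List.map_map, List.any_map]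
    rfl
  -- B side: the run-length scan on the sorted list
  have ht : (PySem.List.sorted sl (fun c => c) false).Pairwise (· ≤ ·) := by
    simpa using PySem.List.sorted_pairwise sl (fun c => c)
  have hperm : (PySem.List.sorted sl (fun c => c) false).Perm sl :=
    PySem.List.sorted_perm sl (fun c => c) false
  have hB : check_duplicates_freq_alt num_str
      = (PySem.List.sorted sl (fun c => c) false).any
          (fun c => ((PySem.List.sorted sl (fun c => c) false).count c == 2)) := by
    unfold check_duplicates_freq_alt
    exact pvGroupScan_eq_any _ _ (le_refl _) ht
  rw [hA, hB, Bool.eq_iff_iff, List.any_eq_true, List.any_eq_true]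
  constructor
  · rintro ⟨k, hk, hkc⟩
    refine ⟨k, hperm.mem_iff.mpr ((PySem.Set.mem_ofList sl k).mp hk), ?_⟩
    rw [hperm.count_eq]
    have : sl.count k = 2 := by exact_mod_cast (beq_iff_eq.mp hkc)
    simp [this]
  · rintro ⟨k, hk, hkc⟩
    refine ⟨k, (PySem.Set.mem_ofList sl k).mpr (hperm.mem_iff.mp hk), ?_⟩
    rw [hperm.count_eq] at hkc
    have : sl.count k = 2 := beq_iff_eq.mp hkc
    simp [this]
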